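-- pv_equiv track=rewrite | github.com/Sovik89/Scaler_inter_n_advanced | advanced_greedy_another_coin_problem.py | solve
-- ===== SOURCE A (Python) =====
-- def solve(A):
--     # @param A : integer
--     # @return an integer
--
--     #generate dynamic denomination
--
--     max_denomination=1
--
--     while max_denomination<A:
--         if max_denomination*5>=A:
--             if max_denomination*5==A:
--                 max_denomination*=5
--             break
--         max_denomination*=5
--
--     ans=0
--     remaining_val=0
--
--     while A>0:
--         remaining_val=A%max_denomination
--         ans+=(A//max_denomination)
--         max_denomination//=5
--         A=remaining_val
--
--     return ans
-- ===== SOURCE B (Python) =====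
-- def solve(A):
--     # Greedy with powers-of-5 denominations = sum of A's base-5 digits,
--     # extracted from the low end; no denomination pre-scan needed.
--     ans = 0
--     while A > 0:
--         ans += A % 5
--         A //= 5
--     return ans
-- ===== Notes on version B (the rewrite author's own statement) =====
-- stated objective: simpler
-- what changed: Replaces A's upward search for the largest power-of-5 denomination followed by a top-down greedy division loop with a single bottom-up loop summing A's base-5 digits (ans += A%5; A //= 5).
import Mathlib
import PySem

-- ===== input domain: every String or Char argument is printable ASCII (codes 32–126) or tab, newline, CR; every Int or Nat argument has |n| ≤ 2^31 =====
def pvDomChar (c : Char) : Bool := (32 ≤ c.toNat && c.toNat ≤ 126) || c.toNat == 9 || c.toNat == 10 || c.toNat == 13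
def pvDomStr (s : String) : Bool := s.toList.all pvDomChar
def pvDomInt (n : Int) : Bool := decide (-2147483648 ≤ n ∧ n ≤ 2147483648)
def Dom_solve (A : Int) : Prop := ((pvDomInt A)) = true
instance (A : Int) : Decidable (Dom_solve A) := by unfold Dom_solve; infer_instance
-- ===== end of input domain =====

-- B replaces A's two loops (upward denomination search, then top-down greedy)
-- with one bottom-up base-5 digit-sum loop; equal return value on every Int.

-- ===== PORT A =====
-- first while loop: grow max_denomination by factors of 5 (fuel makes the
-- recursion total; the call below supplies enough fuel for every input)
def solveLoop1 : Nat → Int → Int → Int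
  | 0, _, d => d
  | fuel + 1, A, d =>
    if d < A then
      if d * 5 ≥ A then (if d * 5 = A then d * 5 else d)
      else solveLoop1 fuel A (d * 5)
    else d

-- second while loop: greedy division by descending denominations
def solveLoop2 : Nat → Int → Int → Int → Int
  | 0, _, _, ans => ans
  | fuel + 1, A, d, ans =>
    if A > 0 then
      solveLoop2 fuel (PySem.Int.mod A d) (PySem.Int.floordiv d 5)
        (ans + PySem.Int.floordiv A d)
    else ans

def solve (A : Int) : Int :=
  solveLoop2 (A.toNat + 2) A (solveLoop1 (A.toNat + 1) A 1) 0

-- ===== PORT B =====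
def solveAltLoop (A ans : Int) : Int :=
  if A > 0 then
    solveAltLoop (PySem.Int.floordiv A 5) (ans + PySem.Int.mod A 5)
  else ans
termination_by A.toNat
decreasing_by
  have h5 : PySem.Int.floordiv A 5 = A / 5 := PySem.Int.floordiv_eq_ediv_of_pos (by omega)
  rw [h5]; omega

def solve_alt (A : Int) : Int := solveAltLoop A 0

-- ===== PRECONDITION & SPEC =====
def Spec_solve (A : Int) (out : Int) : Prop := out = solve_alt A
instance (A : Int) (out : Int) : Decidable (Spec_solve A out) := by unfold Spec_solve; infer_instance

-- ===== CLAIM (what is proved, stated in full; the proofs are below) =====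
def Claim_equal_solve : Prop := ∀ (A : Int), Dom_solve A → Spec_solve A (solve A)

-- ===== LEMMAS AND PROOFS =====

theorem solveAltLoop_nonpos {A ans : Int} (h : ¬ A > 0) : solveAltLoop A ans = ans := by
  rw [solveAltLoop]; simp [h]

theorem solveAltLoop_pos {A : Int} (ans : Int) (h : A > 0) :
    solveAltLoop A ans = solveAltLoop (A / 5) (ans + A % 5) := by
  rw [solveAltLoop, if_pos h, PySem.Int.floordiv_eq_ediv_of_pos (show (0:Int) < 5 by omega),
      PySem.Int.mod_eq_emod_of_pos (show (0:Int) < 5 by omega)]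

-- accumulator lemma
theorem solveAltLoop_acc (A ans : Int) : solveAltLoop A ans = ans + solveAltLoop A 0 := by
  by_cases h : A > 0
  · have ih := solveAltLoop_acc (A / 5)
    rw [solveAltLoop_pos ans h, solveAltLoop_pos 0 h, ih (ans + A % 5), ih (0 + A % 5)]
    ring
  · rw [solveAltLoop_nonpos h, solveAltLoop_nonpos h]; ring
termination_by A.toNat
decreasing_by omega

theorem solveAltLoop_small {q : Int} (h0 : 0 ≤ q) (h5 : q < 5) : solveAltLoop q 0 = q := by
  by_cases hq : q > 0
  · rw [solveAltLoop_pos 0 hq]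
    have h1 : q / 5 = 0 := Int.ediv_eq_zero_of_lt h0 h5
    have h2 : q % 5 = q := Int.emod_eq_of_lt h0 h5
    rw [h1, h2, solveAltLoop_nonpos (by omega)]; ring
  · rw [solveAltLoop_nonpos hq]; omega

-- splitting off the top base-5 digit
theorem solveAltLoop_split (k : Nat) (q r : Int) (hq0 : 0 ≤ q) (hq5 : q < 5)
    (hr0 : 0 ≤ r) (hr : r < 5 ^ (k + 1)) :
    solveAltLoop (q * 5 ^ (k + 1) + r) 0 = q + solveAltLoop r 0 := by
  induction k generalizing q r with
  | zero =>
    by_cases hq : q > 0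
    · have hA : q * 5 ^ 1 + r > 0 := by nlinarith
      rw [solveAltLoop_pos 0 hA]
      have hdiv : (q * 5 ^ 1 + r) / 5 = q := by omega
      have hmod : (q * 5 ^ 1 + r) % 5 = r := by omega
      rw [hdiv, hmod, solveAltLoop_acc q (0 + r), solveAltLoop_small hq0 hq5,
          solveAltLoop_small hr0 (by simpa using hr)]
      ring
    · have hq' : q = 0 := by omega
      subst hq'; simp
  | succ k ih =>
    by_cases hA : q * 5 ^ (k + 1 + 1) + r > 0
    · rw [solveAltLoop_pos 0 hA]
      have hp : (5:Int) ^ (k + 1 + 1) = 5 ^ (k + 1) * 5 := by ring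
      have hdiv : (q * 5 ^ (k + 1 + 1) + r) / 5 = q * 5 ^ (k + 1) + r / 5 := by
        rw [show q * 5 ^ (k + 1 + 1) + r = r + 5 * (q * 5 ^ (k + 1)) by rw [hp]; ring]
        rw [Int.add_mul_ediv_left r (q * 5 ^ (k + 1)) (by omega)]
        ring
      have hmod : (q * 5 ^ (k + 1 + 1) + r) % 5 = r % 5 := by
        rw [show q * 5 ^ (k + 1 + 1) + r = r + 5 * (q * 5 ^ (k + 1)) by rw [hp]; ring]
        rw [Int.add_mul_emod_self_left]
      have hr5 : r / 5 < 5 ^ (k + 1) := by omega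
      rw [hdiv, hmod, solveAltLoop_acc, ih q (r / 5) hq0 hq5 (by omega) hr5]
      by_cases hrpos : r > 0
      · rw [solveAltLoop_pos 0 hrpos]
        have hacc := solveAltLoop_acc (r / 5) (0 + r % 5)
        omega
      · have hr' : r = 0 := by omega
        subst hr'; simp [solveAltLoop_nonpos (show ¬ (0:Int) > 0 by omega)]
    · have hq' : q = 0 := by nlinarith
      have hr' : r = 0 := by nlinarith
      subst hq'; subst hr'; simp

-- the first loop returns a power of 5 bracketing A, and never exceeds max(A,1)
theorem solveLoop1_spec (fuel : Nat) (A : Int) :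
    ∀ d : Int, 0 < d → d ≤ A → (d < A → A ≤ d * 5 ^ fuel) →
    ∃ j : Nat, solveLoop1 fuel A d = d * 5 ^ j ∧ A < 5 * (d * 5 ^ j) ∧ d * 5 ^ j ≤ A := by
  induction fuel with
  | zero =>
    intro d hd hdA hfuel
    refine ⟨0, by simp [solveLoop1], ?_, ?_⟩
    · simp
      by_cases h : d < A
      · have := hfuel h; simp at this; omega
      · omega
    · simpa using hdA
  | succ fuel ih =>
    intro d hd hdA hfuel
    by_cases h : d < A
    · by_cases h5 : d * 5 ≥ A
      · by_cases he : d * 5 = A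
        · exact ⟨1, by simp [solveLoop1, h, he], by simp; nlinarith, by simp; omega⟩
        · exact ⟨0, by simp [solveLoop1, h, h5, he], by simp; omega, by simpa using hdA⟩
      · have hrec : solveLoop1 (fuel + 1) A d = solveLoop1 fuel A (d * 5) := by
          simp [solveLoop1, h, h5]
        obtain ⟨j, hj1, hj2, hj3⟩ := ih (d * 5) (by omega) (by omega)
          (fun _ => by have := hfuel h; calc A ≤ d * 5 ^ (fuel + 1) := this
                                          _ = d * 5 * 5 ^ fuel := by ring)
        exact ⟨j + 1, by rw [hrec, hj1]; ring, by rw [show d * 5 ^ (j+1) = d * 5 * 5 ^ j by ring]; exact hj2,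
               by rw [show d * 5 ^ (j+1) = d * 5 * 5 ^ j by ring]; exact hj3⟩
    · exact ⟨0, by simp [solveLoop1, h], by simp; omega, by simpa using hdA⟩

-- the second loop with denomination 5^k equals B's digit-sum loop
theorem solveLoop2_eq (k : Nat) :
    ∀ fuel : Nat, ∀ A ans : Int, k + 2 ≤ fuel → 0 ≤ A → A < 5 ^ (k + 1) →
    solveLoop2 fuel A ((5:Int) ^ k) ans = solveAltLoop A ans := by
  induction k with
  | zero =>
    intro fuel A ans hfuel hA0 hA5
    obtain ⟨f, rfl⟩ : ∃ f, fuel = f + 2 := ⟨fuel - 2, by omega⟩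
    by_cases hA : A > 0
    · have hm : PySem.Int.mod A 1 = 0 := by
        rw [PySem.Int.mod_eq_emod_of_pos (by omega)]; simp
      have hd : PySem.Int.floordiv A 1 = A := by
        rw [PySem.Int.floordiv_eq_ediv_of_pos (by omega)]; simp
      show solveLoop2 (f + 1 + 1) A _ ans = _
      rw [solveLoop2]
      simp only [hA, if_pos]
      norm_num [hm, hd]
      rw [solveLoop2]
      simp only [show ¬ (0:Int) > 0 by omega, if_neg, not_false_iff]
      rw [solveAltLoop_pos ans hA, Int.ediv_eq_zero_of_lt hA0 (by simpa using hA5),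
          Int.emod_eq_of_lt hA0 (by simpa using hA5),
          solveAltLoop_nonpos (show ¬ (0:Int) > 0 by omega)]
    · show solveLoop2 (f + 1 + 1) A _ ans = _
      rw [solveLoop2, solveAltLoop_nonpos hA]
      simp [hA]
  | succ k ih =>
    intro fuel A ans hfuel hA0 hA5
    obtain ⟨f, rfl⟩ : ∃ f, fuel = f + 1 := ⟨fuel - 1, by omega⟩
    by_cases hA : A > 0
    · rw [solveLoop2]
      simp only [hA, if_pos]
      have hpow : (0:Int) < 5 ^ (k + 1) := by positivity
      have hdd : PySem.Int.floordiv ((5:Int) ^ (k + 1)) 5 = 5 ^ k := by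
        rw [PySem.Int.floordiv_eq_ediv_of_pos (by omega),
            show (5:Int) ^ (k + 1) = 5 ^ k * 5 by ring, Int.mul_ediv_cancel _ (by omega)]
      have hm : PySem.Int.mod A (5 ^ (k + 1)) = A % 5 ^ (k + 1) :=
        PySem.Int.mod_eq_emod_of_pos hpow
      have hq : PySem.Int.floordiv A (5 ^ (k + 1)) = A / 5 ^ (k + 1) :=
        PySem.Int.floordiv_eq_ediv_of_pos hpow
      rw [hdd, hm, hq,
          ih f (A % 5 ^ (k + 1)) (ans + A / 5 ^ (k + 1)) (by omega)
            (Int.emod_nonneg A (by positivity)) (Int.emod_lt_of_pos A hpow)]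
      -- relate B's loop on A to B's loop on A's remainder
      have hqb : 0 ≤ A / 5 ^ (k + 1) := Int.ediv_nonneg hA0 (by positivity)
      have hq5 : A / 5 ^ (k + 1) < 5 := by
        have h52 : (5:Int) ^ (k + 2) = 5 * 5 ^ (k + 1) := by ring
        rw [Int.ediv_lt_iff_lt_mul hpow]; omega
      have hsplit := solveAltLoop_split k (A / 5 ^ (k + 1)) (A % 5 ^ (k + 1))
        hqb hq5 (Int.emod_nonneg A (by positivity)) (Int.emod_lt_of_pos A hpow)
      have hAeq : A / 5 ^ (k + 1) * 5 ^ (k + 1) + A % 5 ^ (k + 1) = A :=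
        Int.ediv_mul_add_emod A _
      rw [solveAltLoop_acc (A % 5 ^ (k + 1)),
          solveAltLoop_acc A ans,
          show solveAltLoop A 0 = A / 5 ^ (k+1) + solveAltLoop (A % 5 ^ (k+1)) 0 by
            rw [← hsplit, hAeq]]
      ring
    · rw [solveLoop2, solveAltLoop_nonpos hA]
      simp [hA]

-- ===== VERDICT (by name: the statement is the Claim_ definition above) =====
theorem solve_spec : Claim_equal_solve := by
  intro A _
  unfold Spec_solve solve solve_alt
  by_cases hA : 0 < A
  · obtain ⟨j, hj1, hj2, hj3⟩ := solveLoop1_spec (A.toNat + 1) A 1 (by omega) (by omega)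
      (fun _ => by
        have h1 : A.toNat < 5 ^ A.toNat := Nat.lt_pow_self (by omega)
        have h2 : ((5:Nat) ^ A.toNat : Int) ≤ 5 ^ (A.toNat + 1) := by
          push_cast
          have : (5:Int) ^ A.toNat ≤ 5 ^ A.toNat * 5 := by nlinarith [pow_pos (show (0:Int) < 5 by omega) A.toNat]
          calc (5:Int) ^ A.toNat ≤ 5 ^ A.toNat * 5 := this
            _ = 5 ^ (A.toNat + 1) := by ring
        have : (A.toNat : Int) < (5:Int) ^ A.toNat := by exact_mod_cast h1
        simp only [one_mul]
        omega)
    simp only [one_mul] at hj1 hj2 hj3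
    have hjle : j + 2 ≤ A.toNat + 2 := by
      have h1 : (j : Int) < 5 ^ j := by exact_mod_cast Nat.lt_pow_self (show 1 < 5 by omega) (n := j)
      omega
    rw [hj1, solveLoop2_eq j (A.toNat + 2) A 0 hjle (by omega) (by
      have : (5:Int) ^ (j + 1) = 5 * 5 ^ j := by ring
      omega)]
  · have h1 : solveLoop1 (A.toNat + 1) A 1 = 1 := by
      show solveLoop1 (A.toNat + 1) A 1 = 1
      rw [solveLoop1]
      simp only [if_neg (show ¬ (1:Int) < A by omega)]
    rw [h1]
    show solveLoop2 (A.toNat + 1 + 1) A 1 0 = _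
    rw [solveLoop2, solveAltLoop_nonpos (by omega)]
    simp [show ¬ A > 0 by omega]
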